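-- pv_equiv track=rewrite | github.com/zgwuthu/MOSAIC | mutation_less_than_10_part1.py | exact_match_worker
-- ===== SOURCE A (Python) =====
-- def exact_match_worker(args):
--     """Exact match worker process - stop searching gene once match found"""
--     batch_seqs, genes_dict, found_genes = args
--     newly_found = set()
--
--     for gene, seq in genes_dict.items():
--         if gene in found_genes or gene in newly_found:
--             continue
--
--         for read_seq in batch_seqs:
--             if seq in read_seq:
--                 newly_found.add(gene)
--                 break
--
--     return newly_found
-- ===== SOURCE B (Python) =====
-- def exact_match_worker(args):
--     """Exact match worker: dedup candidate sequences, scan reads outer-loop,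
--     then keep the candidate genes whose sequence matched."""
--     batch_seqs, genes_dict, found_genes = args
--     skip = set(found_genes)
--     candidates = [(g, s) for g, s in genes_dict.items() if g not in skip]
--     unique_seqs = list(dict.fromkeys(s for _, s in candidates))
--     matched = set()
--     for read in batch_seqs:
--         for s in unique_seqs:
--             if s in read:
--                 matched.add(s)
--     return set(g for g, s in candidates if s in matched)
-- ===== Notes on version B (the rewrite author's own statement) =====
-- stated objective: alternative
-- what changed: Replaces the gene-outer loop with in-loop set mutation and break by a pipeline: hoist found_genes into a set, filter candidates once, dedup their sequences, scan each read once against the distinct sequences (reads-outer traversal, so a repeated sequence is never re-scanned), then filter the candidate genes by the matched-sequence set.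
import Mathlib
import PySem

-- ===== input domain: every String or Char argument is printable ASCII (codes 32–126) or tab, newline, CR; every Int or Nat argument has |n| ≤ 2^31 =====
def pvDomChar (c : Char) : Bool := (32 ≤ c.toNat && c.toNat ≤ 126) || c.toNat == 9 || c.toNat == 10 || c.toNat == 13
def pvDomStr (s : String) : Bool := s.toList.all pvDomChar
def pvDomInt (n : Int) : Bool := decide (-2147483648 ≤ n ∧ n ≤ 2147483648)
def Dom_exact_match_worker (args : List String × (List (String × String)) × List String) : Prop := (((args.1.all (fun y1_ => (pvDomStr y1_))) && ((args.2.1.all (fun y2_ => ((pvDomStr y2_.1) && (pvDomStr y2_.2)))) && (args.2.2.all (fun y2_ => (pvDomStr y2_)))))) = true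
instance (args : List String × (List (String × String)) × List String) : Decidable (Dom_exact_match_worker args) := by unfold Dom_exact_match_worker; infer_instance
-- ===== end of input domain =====

-- B replaces A's gene-outer loop (with break and in-loop set mutation) by a pipeline:
-- filter candidates once against set(found_genes), dedup their sequences, scan the reads
-- in the OUTER loop against the distinct sequences, then filter genes by the matched set.

-- ===== PORT A =====
-- inner 'for read_seq in batch_seqs: if seq in read_seq: …; break' — stops at the first read containing seq
def pvScanReads (seq : String) (reads : List String) : Bool :=
  match reads with
  | [] => false
  | r :: rs => if PySem.Str.isIn seq r then true else pvScanReads seq rs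

def exact_match_worker (args : List String × (List (String × String)) × List String) : List String :=
  let batch_seqs := args.1
  let genes_dict := args.2.1
  let found_genes := args.2.2
  -- for gene, seq in genes_dict.items(): … (genes_dict is a Python dict: ofList collapses duplicate keys)
  ((PySem.Dict.ofList genes_dict).items).foldl
    (fun newly_found p =>
      if found_genes.contains p.1 || PySem.Set.contains newly_found p.1 then newly_found
      else if pvScanReads p.2 batch_seqs then PySem.Set.add newly_found p.1 else newly_found)
    PySem.Set.empty

-- ===== PORT B =====
def exact_match_worker_alt (args : List String × (List (String × String)) × List String) : List String :=
  let batch_seqs := args.1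
  let genes_dict := args.2.1
  let found_genes := args.2.2
  let skip : PySem.Set String := PySem.Set.ofList found_genes
  let candidates := ((PySem.Dict.ofList genes_dict).items).filter
    (fun p => !(PySem.Set.contains skip p.1))
  let unique_seqs := PySem.List.dedup (candidates.map Prod.snd)
  let matched : PySem.Set String := batch_seqs.foldl
    (fun m read => unique_seqs.foldl
      (fun m s => if PySem.Str.isIn s read then PySem.Set.add m s else m) m)
    PySem.Set.empty
  PySem.Set.ofList
    ((candidates.filter (fun p => PySem.Set.contains matched p.2)).map Prod.fst)

-- ===== PRECONDITION & SPEC =====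
def Spec_exact_match_worker (args : List String × (List (String × String)) × List String) (out : List String) : Prop := out = exact_match_worker_alt args
instance (args : List String × (List (String × String)) × List String) (out : List String) : Decidable (Spec_exact_match_worker args out) := by unfold Spec_exact_match_worker; infer_instance

-- ===== CLAIM (what is proved, stated in full; the proofs are below) =====
def Claim_equal_exact_match_worker : Prop := ∀ (args : List String × (List (String × String)) × List String), Dom_exact_match_worker args → Spec_exact_match_worker args (exact_match_worker args)

-- ===== LEMMAS AND PROOFS =====

-- pvScanReads = "some read contains seq"
theorem pvScanReads_iff (seq : String) (reads : List String) :
    pvScanReads seq reads = true ↔ ∃ r ∈ reads, PySem.Str.isIn seq r = true := by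
  induction reads with
  | nil => simp [pvScanReads]
  | cons r rs ih =>
    rw [pvScanReads]
    by_cases h : PySem.Str.isIn seq r = true
    · rw [if_pos h]
      exact ⟨fun _ => ⟨r, List.mem_cons_self .., h⟩, fun _ => rfl⟩
    · rw [if_neg h, ih]
      constructor
      · rintro ⟨r', hr', hin⟩
        exact ⟨r', List.mem_cons_of_mem _ hr', hin⟩
      · rintro ⟨r', hr', hin⟩
        rcases List.mem_cons.mp hr' with rfl | hr'
        · exact absurd hin h
        · exact ⟨r', hr', hin⟩

-- membership after folding `add` over the elements of `us` satisfying `q`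
theorem mem_innerFold {α : Type} [BEq α] [LawfulBEq α] (q : α → Bool) (us : List α)
    (m : PySem.Set α) (s : α) :
    s ∈ us.foldl (fun m u => if q u then PySem.Set.add m u else m) m ↔
      s ∈ m ∨ (s ∈ us ∧ q s = true) := by
  induction us generalizing m with
  | nil => simp
  | cons u us ih =>
    rw [List.foldl_cons]
    by_cases h : q u = true
    · rw [if_pos h, ih]
      simp only [PySem.Set.mem_add, List.mem_cons]
      constructor
      · rintro ((hm | rfl) | ⟨hu, hq⟩)
        · exact Or.inl hm
        · exact Or.inr ⟨Or.inl rfl, h⟩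
        · exact Or.inr ⟨Or.inr hu, hq⟩
      · rintro (hm | ⟨(rfl | hu), hq⟩)
        · exact Or.inl (Or.inl hm)
        · exact Or.inl (Or.inr rfl)
        · exact Or.inr ⟨hu, hq⟩
    · rw [if_neg h, ih]
      simp only [List.mem_cons]
      constructor
      · rintro (hm | ⟨hu, hq⟩)
        · exact Or.inl hm
        · exact Or.inr ⟨Or.inr hu, hq⟩
      · rintro (hm | ⟨(rfl | hu), hq⟩)
        · exact Or.inl hm
        · exact absurd hq h
        · exact Or.inr ⟨hu, hq⟩

-- membership in B's doubly-nested matched-set fold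
theorem mem_matchedFold {α β : Type} [BEq α] [LawfulBEq α] (p : α → β → Bool)
    (reads : List β) (us : List α) (m : PySem.Set α) (s : α) :
    s ∈ reads.foldl (fun m read => us.foldl
        (fun m u => if p u read then PySem.Set.add m u else m) m) m ↔
      s ∈ m ∨ (s ∈ us ∧ ∃ r ∈ reads, p s r = true) := by
  induction reads generalizing m with
  | nil => simp
  | cons r rs ih =>
    rw [List.foldl_cons, ih, mem_innerFold]
    constructor
    · rintro ((hm | ⟨hu, hq⟩) | ⟨hu, r', hr', hq⟩)
      · exact Or.inl hm
      · exact Or.inr ⟨hu, r, List.mem_cons_self .., hq⟩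
      · exact Or.inr ⟨hu, r', List.mem_cons_of_mem _ hr', hq⟩
    · rintro (hm | ⟨hu, r', hr', hq⟩)
      · exact Or.inl (Or.inl hm)
      · rcases List.mem_cons.mp hr' with rfl | hr'
        · exact Or.inl (Or.inr ⟨hu, hq⟩)
        · exact Or.inr ⟨hu, r', hr', hq⟩

-- A's fold appends, in items order, the not-yet-found genes whose sequence matches
theorem foldA_eq (found reads : List String) (items : List (String × String))
    (nf : PySem.Set String)
    (hnd : (items.map Prod.fst).Nodup)
    (h : ∀ p ∈ items, p.1 ∉ nf) :
    items.foldl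
      (fun newly_found p =>
        if found.contains p.1 || PySem.Set.contains newly_found p.1 then newly_found
        else if pvScanReads p.2 reads then PySem.Set.add newly_found p.1 else newly_found)
      nf =
    nf ++ (items.filter
      (fun p => pvScanReads p.2 reads && !found.contains p.1)).map Prod.fst := by
  induction items generalizing nf with
  | nil => simp
  | cons p ps ih =>
    rw [List.map_cons, List.nodup_cons] at hnd
    obtain ⟨hpf, hnd'⟩ := hnd
    have hp1 : p.1 ∉ nf := h p (List.mem_cons_self ..)
    have htail : ∀ q ∈ ps, q.1 ∉ nf := fun q hq => h q (List.mem_cons_of_mem _ hq)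
    rw [List.foldl_cons, List.filter_cons]
    by_cases hfm : p.1 ∈ found
    · rw [if_pos (by simp [hfm]), ih nf hnd' htail,
        if_neg (by simp [hfm])]
    · rw [if_neg (by simp [hfm, hp1])]
      by_cases hs : pvScanReads p.2 reads = true
      · have hadd : PySem.Set.add nf p.1 = nf ++ [p.1] := by
          simp [PySem.Set.add, hp1]
        have htail' : ∀ q ∈ ps, q.1 ∉ nf ++ [p.1] := by
          intro q hq hmem
          rcases List.mem_append.mp hmem with hm | hm
          · exact htail q hq hm
          · have heq : q.1 = p.1 := by simpa using hm
            exact hpf (heq ▸ List.mem_map_of_mem hq)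
        rw [if_pos hs, hadd, ih (nf ++ [p.1]) hnd' htail',
          if_pos (by simp [hfm, hs])]
        simp
      · rw [if_neg hs, ih nf hnd' htail,
          if_neg (by simp [eq_false_of_ne_true hs])]

-- ===== VERDICT (by name: the statement is the Claim_ definition above) =====
theorem exact_match_worker_spec : Claim_equal_exact_match_worker := by
  intro args _
  obtain ⟨reads, gd, found⟩ := args
  unfold Spec_exact_match_worker exact_match_worker exact_match_worker_alt
  simp only
  have hnd : ((PySem.Dict.ofList gd).items.map Prod.fst).Nodup :=
    PySem.Dict.nodup_keys_ofList gd
  set items := (PySem.Dict.ofList gd).items with hitems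
  set cand := items.filter (fun p => !(PySem.Set.contains (PySem.Set.ofList found) p.1))
    with hcand
  -- A's side in closed form
  rw [foldA_eq found reads items PySem.Set.empty hnd
      (by intro p _ hmem; simp [PySem.Set.empty] at hmem)]
  -- B's matched-set test agrees with pvScanReads on every candidate
  have hmatch : ∀ p ∈ cand,
      PySem.Set.contains
        (reads.foldl (fun m read => (PySem.List.dedup (cand.map Prod.snd)).foldl
          (fun m s => if PySem.Str.isIn s read then PySem.Set.add m s else m) m)
          PySem.Set.empty) p.2 = pvScanReads p.2 reads := by
    intro p hp
    have hmem : p.2 ∈ PySem.List.dedup (cand.map Prod.snd) :=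
      (PySem.List.mem_dedup _ _).mpr (List.mem_map_of_mem hp)
    by_cases hs : pvScanReads p.2 reads = true
    · rw [hs]
      refine (PySem.Set.contains_iff _ _).mpr
        ((mem_matchedFold _ _ _ _ _).mpr (Or.inr ⟨hmem, ?_⟩))
      exact (pvScanReads_iff _ _).mp hs
    · rw [eq_false_of_ne_true hs, ← Bool.not_eq_true]
      intro hc
      rcases (mem_matchedFold _ _ _ _ _).mp ((PySem.Set.contains_iff _ _).mp hc) with
        h0 | ⟨_, hex⟩
      · simp [PySem.Set.empty] at h0
      · exact hs ((pvScanReads_iff _ _).mpr hex)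
  rw [List.filter_congr hmatch]
  -- B's candidate filter agrees with A's found_genes test
  have hskip : items.filter (fun p => !(PySem.Set.contains (PySem.Set.ofList found) p.1)) =
      items.filter (fun p => !found.contains p.1) := by
    refine List.filter_congr ?_
    intro p _
    by_cases h : p.1 ∈ found
    · simp [PySem.Set.mem_ofList, h]
    · simp [PySem.Set.mem_ofList, h]
  rw [hcand, hskip, List.filter_filter]
  -- the result list has no duplicate genes, so set(…) is the identity
  have hsub : ((items.filter
      (fun p => pvScanReads p.2 reads && !found.contains p.1)).map Prod.fst).Sublist
      (items.map Prod.fst) := List.filter_sublist.map Prod.fst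
  rw [PySem.Set.ofList_eq_self_of_nodup _ (hnd.sublist hsub)]
  simp [PySem.Set.empty]
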